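-- pv_equiv track=rewrite | github.com/emKat-tecbot/Administrador-para-estudiantes- | organizador_de_horario/codigo_horario.py | encontrar_slot_para_tarea
-- ===== SOURCE A (Python) =====
-- from typing import Optional
--
-- LIBRE = "LIBRE"
--
-- def encontrar_slot_para_tarea(fila: list[str], energia: str) -> Optional[int]:
--     indices_libres = []
--     for i, c in enumerate(fila):
--         if c == LIBRE:
--             indices_libres.append(i)
--     if not indices_libres:
--         return None
--     e = energia.upper() if isinstance(energia, str) else "MEDIA"
--     if e == "ALTA":
--         return indices_libres[0]
--     if e == "BAJA":
--         return indices_libres[-1]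
--     return indices_libres[len(indices_libres) // 2]
-- ===== SOURCE B (Python) =====
-- from typing import Optional
--
-- LIBRE = "LIBRE"
--
-- def encontrar_slot_para_tarea(fila: list[str], energia: str) -> Optional[int]:
--     # Count free slots, pick a target rank, then rescan until that rank is reached:
--     # no list of indices is ever built.
--     libres = 0
--     for c in fila:
--         if c == LIBRE:
--             libres += 1
--     if libres == 0:
--         return None
--     e = energia.upper() if isinstance(energia, str) else "MEDIA"
--     if e == "ALTA":
--         target = 0
--     elif e == "BAJA":
--         target = libres - 1
--     else:
--         target = libres // 2
--     seen = 0
--     for i, c in enumerate(fila):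
--         if c == LIBRE:
--             if seen == target:
--                 return i
--             seen += 1
-- ===== Notes on version B (the rewrite author's own statement) =====
-- stated objective: alternative
-- what changed: Instead of materialising a list of free indices and indexing into it, B counts free slots, turns the energy level into a target rank (0 / count-1 / count//2), and rescans the row with an integer counter, returning the index where the counter reaches the rank; only O(1) extra state is kept.
import Mathlib
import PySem

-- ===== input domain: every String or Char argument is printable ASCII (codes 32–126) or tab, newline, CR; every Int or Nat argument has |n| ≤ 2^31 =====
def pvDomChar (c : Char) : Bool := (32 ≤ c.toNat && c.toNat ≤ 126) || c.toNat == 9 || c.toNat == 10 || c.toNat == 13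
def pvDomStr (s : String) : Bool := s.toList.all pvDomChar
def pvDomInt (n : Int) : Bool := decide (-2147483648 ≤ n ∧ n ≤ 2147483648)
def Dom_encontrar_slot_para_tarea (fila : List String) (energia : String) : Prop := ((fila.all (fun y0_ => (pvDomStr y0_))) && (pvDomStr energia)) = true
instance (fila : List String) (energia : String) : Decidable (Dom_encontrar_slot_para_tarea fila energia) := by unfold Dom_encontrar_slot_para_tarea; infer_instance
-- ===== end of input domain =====

-- B replaces A's materialised list of free indices by a count plus a second
-- counting scan (objective: alternative, O(1) extra state instead of O(n)).

-- ===== PORT A =====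
def encontrar_slot_para_tarea (fila : List String) (energia : String) : Option Int :=
  let indices_libres := (PySem.List.enumerate fila).foldl
    (fun acc p => if p.2 == "LIBRE" then acc ++ [p.1] else acc) ([] : List Int)
  if indices_libres = [] then none
  else
    let e := PySem.Str.upper energia
    if e = "ALTA" then PySem.List.pyGet? indices_libres 0
    else if e = "BAJA" then PySem.List.pyGet? indices_libres (-1)
    else PySem.List.pyGet? indices_libres
      (PySem.Int.floordiv (indices_libres.length : Int) 2)

-- ===== PORT B =====
-- second pass of Source B: return the index of the `target`-th free cell
def pvScanLibre : List String → Int → Nat → Nat → Option Int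
  | [], _, _, _ => none
  | c :: rest, i, seen, target =>
    if c == "LIBRE" then
      if seen = target then some i
      else pvScanLibre rest (i + 1) (seen + 1) target
    else pvScanLibre rest (i + 1) seen target

def encontrar_slot_para_tarea_alt (fila : List String) (energia : String) : Option Int :=
  let libres := fila.foldl (fun n c => if c == "LIBRE" then n + 1 else n) (0 : Nat)
  if libres = 0 then none
  else
    let e := PySem.Str.upper energia
    let target : Nat :=
      if e = "ALTA" then 0
      else if e = "BAJA" then libres - 1
      else libres / 2
    pvScanLibre fila 0 0 target

-- ===== PRECONDITION & SPEC =====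
def Spec_encontrar_slot_para_tarea (fila : List String) (energia : String) (out : Option Int) : Prop := out = encontrar_slot_para_tarea_alt fila energia
instance (fila : List String) (energia : String) (out : Option Int) : Decidable (Spec_encontrar_slot_para_tarea fila energia out) := by unfold Spec_encontrar_slot_para_tarea; infer_instance

-- ===== CLAIM (what is proved, stated in full; the proofs are below) =====
def Claim_equal_encontrar_slot_para_tarea : Prop := ∀ (fila : List String) (energia : String), Dom_encontrar_slot_para_tarea fila energia → Spec_encontrar_slot_para_tarea fila energia (encontrar_slot_para_tarea fila energia)

-- ===== LEMMAS AND PROOFS =====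

-- the list of indices of free cells, starting the numbering at i
def freeIdx : List String → Int → List Int
  | [], _ => []
  | c :: r, i => if c == "LIBRE" then i :: freeIdx r (i + 1) else freeIdx r (i + 1)

theorem foldA_eq_freeIdx (l : List String) (i : Int) (acc : List Int) :
    (PySem.List.enumerate l i).foldl
      (fun acc p => if p.2 == "LIBRE" then acc ++ [p.1] else acc) acc
      = acc ++ freeIdx l i := by
  induction l generalizing i acc with
  | nil => simp [PySem.List.enumerate_nil, freeIdx]
  | cons c r ih =>
    simp only [PySem.List.enumerate_cons, List.foldl_cons, freeIdx]
    by_cases h : (c == "LIBRE") = true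
    · rw [if_pos h, if_pos h, ih, List.append_assoc, List.singleton_append]
    · rw [if_neg h, if_neg h, ih]

theorem count_eq_freeIdx_length (l : List String) (i : Int) (n : Nat) :
    l.foldl (fun n c => if c == "LIBRE" then n + 1 else n) n
      = n + (freeIdx l i).length := by
  induction l generalizing i n with
  | nil => simp [freeIdx]
  | cons c r ih =>
    simp only [List.foldl_cons, freeIdx]
    by_cases h : (c == "LIBRE") = true
    · rw [if_pos h, if_pos h, ih (i + 1) (n + 1)]
      simp only [List.length_cons]
      omega
    · rw [if_neg h, if_neg h, ih (i + 1) n]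

theorem scan_eq_get (l : List String) (i : Int) (seen target : Nat)
    (h : seen ≤ target) :
    pvScanLibre l i seen target = (freeIdx l i)[target - seen]? := by
  induction l generalizing i seen with
  | nil => simp [pvScanLibre, freeIdx]
  | cons c r ih =>
    simp only [pvScanLibre, freeIdx]
    by_cases hc : (c == "LIBRE") = true
    · rw [if_pos hc, if_pos hc]
      by_cases hs : seen = target
      · rw [if_pos hs]; subst hs; simp
      · rw [if_neg hs, ih (i + 1) (seen + 1) (by omega)]
        have heq : target - seen = (target - (seen + 1)) + 1 := by omega
        rw [heq]
        simp
    · rw [if_neg hc, if_neg hc]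
      exact ih (i + 1) seen h

theorem floordiv_two_natCast (n : Nat) :
    PySem.Int.floordiv (n : Int) 2 = ((n / 2 : Nat) : Int) := by
  simp [PySem.Int.floordiv, Int.fdiv_eq_ediv]

-- ===== VERDICT (by name: the statement is the Claim_ definition above) =====
theorem encontrar_slot_para_tarea_spec : Claim_equal_encontrar_slot_para_tarea := by
  intro fila energia _
  unfold Spec_encontrar_slot_para_tarea encontrar_slot_para_tarea encontrar_slot_para_tarea_alt
  simp only [foldA_eq_freeIdx fila 0 [], List.nil_append,
    count_eq_freeIdx_length fila 0 0, Nat.zero_add]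
  set fi := freeIdx fila 0 with hfi
  by_cases hempty : fi = []
  · simp [hempty]
  · have hlen : ¬ fi.length = 0 := by
      simpa using fun h => hempty (List.length_eq_zero_iff.mp h)
    rw [if_neg hempty, if_neg hlen]
    by_cases hA : PySem.Str.upper energia = "ALTA"
    · rw [if_pos hA, if_pos hA, scan_eq_get fila 0 0 0 le_rfl, ← hfi]
      simp [PySem.List.pyGet?_zero]
    · rw [if_neg hA, if_neg hA]
      by_cases hB : PySem.Str.upper energia = "BAJA"
      · rw [if_pos hB, if_pos hB,
          scan_eq_get fila 0 0 (fi.length - 1) (Nat.zero_le _), ← hfi]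
        simp [PySem.List.pyGet?_neg_one, List.getLast?_eq_getElem?]
      · rw [if_neg hB, if_neg hB,
          scan_eq_get fila 0 0 (fi.length / 2) (Nat.zero_le _), ← hfi,
          floordiv_two_natCast]
        simp only [PySem.List.pyGet?_natCast, Nat.sub_zero]
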